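-- pv_equiv track=rewrite | github.com/atour-jz/LiederbuchApp | chordpro_parser.py | parse_chordpro
-- ===== SOURCE A (Python) =====
-- def parse_chordpro(file_content):
--     # Logik zum Parsen der ChordPro-Dateien
--     parsed_lines = []
--     for line in file_content.split('\n'):
--         chord_positions = []
--         text_line = ""
--         pos = 0
--         while line:
--             if line.startswith('['):
--                 line = line[1:]
--                 chord = line[:line.index(']')]
--                 line = line[line.index(']')+1:]
--                 chord_positions.append((chord, pos))
--             else:
--                 text_line += line[0]
--                 pos += 1
--                 line = line[1:]
--         parsed_lines.append((chord_positions, text_line))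
--     return parsed_lines
-- ===== SOURCE B (Python) =====
-- def parse_chordpro(file_content):
--     # Single forward index scan per line: no repeated slicing, O(n) per line.
--     parsed_lines = []
--     for line in file_content.split('\n'):
--         chords = []
--         text_chars = []
--         i = 0
--         n = len(line)
--         while i < n:
--             if line[i] == '[':
--                 j = line.index(']', i + 1)
--                 chords.append((line[i + 1:j], len(text_chars)))
--                 i = j + 1
--             else:
--                 text_chars.append(line[i])
--                 i += 1
--         parsed_lines.append((chords, ''.join(text_chars)))
--     return parsed_lines
-- ===== Notes on version B (the rewrite author's own statement) =====
-- stated objective: faster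
-- what changed: B replaces A's repeated string re-slicing (line = line[1:], line[j+1:], O(n) each) with a single forward index pointer over the immutable line, appending text chars and chords in one O(n) pass per line.
import Mathlib
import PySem

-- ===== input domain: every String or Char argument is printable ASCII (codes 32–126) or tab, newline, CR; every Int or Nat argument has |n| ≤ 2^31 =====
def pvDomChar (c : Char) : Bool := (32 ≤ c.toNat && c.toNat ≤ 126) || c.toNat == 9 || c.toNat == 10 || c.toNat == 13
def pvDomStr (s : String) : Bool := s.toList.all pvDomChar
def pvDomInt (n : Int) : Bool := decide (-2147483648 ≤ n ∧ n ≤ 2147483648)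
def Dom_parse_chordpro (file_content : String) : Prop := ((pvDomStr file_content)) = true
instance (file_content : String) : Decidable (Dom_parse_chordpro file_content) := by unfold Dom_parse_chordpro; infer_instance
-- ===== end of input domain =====

-- B replaces A's per-character string re-slicing with a single forward index pointer per cs (objective: faster).

-- ===== PORT A =====
-- A's inner while loop: `cs` shrinks (drop 1 for text, drop past ']' for a chord).
-- `cs.index(']')` is PySem.List.index?; none = ValueError, excluded by Pre_ (the port returns the state so far there).
def pvALine : List Char → List (String × Int) → List Char → Int → (List (String × Int)) × String
  | [], chords, text, _ => (chords, String.ofList text)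
  | c :: rest, chords, text, pos =>
    if c = '[' then
      match PySem.List.index? rest ']' with
      | none => (chords, String.ofList text)   -- cs.index(']') raises ValueError: outside Pre_
      | some j => pvALine (rest.drop (j + 1)) (chords ++ [(String.ofList (rest.take j), pos)]) text pos
    else pvALine rest chords (text ++ [c]) (pos + 1)
  termination_by cs => cs.length
  decreasing_by all_goals (simp [List.length_drop]; try omega)

def parse_chordpro (file_content : String) : List ((List (String × Int)) × String) :=
  (PySem.Chars.splitOn file_content.toList ['\n']).map (fun l => pvALine l [] [] 0)

-- ===== PORT B =====
-- B's inner while loop: index pointer i over the fixed cs; `cs.index(']', i+1)` is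
-- index? on the suffix from i+1 (exact for a one-char needle), the chord is the slice cs[i+1:j].
def pvBLine (cs : List Char) (i : Nat) (chords : List (String × Int)) (text : List Char) :
    (List (String × Int)) × String :=
  if h : i < cs.length then
    if cs[i] = '[' then
      match PySem.List.index? (cs.drop (i + 1)) ']' with
      | none => (chords, String.ofList text)   -- cs.index raises ValueError: outside Pre_
      | some off =>
        pvBLine cs (i + 1 + off + 1)
          (chords ++ [(String.ofList (PySem.List.slice cs (some ((i + 1 : Nat) : Int))
              (some ((i + 1 + off : Nat) : Int))), (text.length : Int))]) text
    else pvBLine cs (i + 1) chords (text ++ [cs[i]])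
  else (chords, String.ofList text)
  termination_by cs.length - i
  decreasing_by all_goals omega

def parse_chordpro_alt (file_content : String) : List ((List (String × Int)) × String) :=
  (PySem.Chars.splitOn file_content.toList ['\n']).map (fun l => pvBLine l 0 [] [])

-- ===== PRECONDITION & SPEC =====
-- Pre_ excludes exactly the inputs on which A raises ValueError: a cs containing a '[' with no ']' after it.
def pvNoDangling : List Char → Bool
  | [] => true
  | c :: rest => (if c = '[' then decide (']' ∈ rest) else true) && pvNoDangling rest

def Pre_parse_chordpro (file_content : String) : Prop :=
  ∀ l ∈ PySem.Chars.splitOn file_content.toList ['\n'], pvNoDangling l = true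
instance (file_content : String) : Decidable (Pre_parse_chordpro file_content) := by
  unfold Pre_parse_chordpro; infer_instance

def pvWitness_parse_chordpro : String := "[C]hello [G]world\nplain"

def Spec_parse_chordpro (file_content : String) (out : List ((List (String × Int)) × String)) : Prop := out = parse_chordpro_alt file_content
instance (file_content : String) (out : List ((List (String × Int)) × String)) : Decidable (Spec_parse_chordpro file_content out) := by unfold Spec_parse_chordpro; infer_instance

-- ===== CLAIM (what is proved, stated in full; the proofs are below) =====
def Claim_equal_parse_chordpro : Prop := ∀ (file_content : String), Dom_parse_chordpro file_content → Pre_parse_chordpro file_content → Spec_parse_chordpro file_content (parse_chordpro file_content)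

-- ===== LEMMAS AND PROOFS =====

-- B's index loop from i computes what A's suffix loop computes on cs.drop i,
-- with A's `pos` equal to the length of the accumulated text (both start at 0 and move together).
lemma pvBLine_eq_pvALine (cs : List Char) (i : Nat) (chords : List (String × Int))
    (text : List Char) :
    pvBLine cs i chords text = pvALine (cs.drop i) chords text (text.length : Int) := by
  by_cases h : i < cs.length
  · rw [pvBLine, dif_pos h, ← List.getElem_cons_drop h, pvALine]
    by_cases hc : cs[i] = '['
    · simp only [if_pos hc]
      cases hidx : PySem.List.index? (cs.drop (i + 1)) ']' with
      | none => rfl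
      | some off =>
        dsimp only
        rw [pvBLine_eq_pvALine cs (i + 1 + off + 1), List.drop_drop,
          PySem.List.slice_natCast]
        have e1 : i + 1 + off + 1 = i + 1 + (off + 1) := by omega
        have e2 : i + 1 + off - (i + 1) = off := by omega
        rw [e1, e2]
    · simp only [if_neg hc]
      rw [pvBLine_eq_pvALine cs (i + 1)]
      have : ((text ++ [cs[i]]).length : Int) = (text.length : Int) + 1 := by
        simp
      rw [this]
  · rw [pvBLine, dif_neg h, List.drop_eq_nil_of_le (by omega), pvALine]
  termination_by cs.length - i
  decreasing_by all_goals omega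

-- ===== VERDICT (by name: the statement is the Claim_ definition above) =====
theorem parse_chordpro_spec : Claim_equal_parse_chordpro := by
  intro fc _ _
  unfold Spec_parse_chordpro parse_chordpro parse_chordpro_alt
  refine List.map_congr_left (fun l _ => ?_)
  rw [pvBLine_eq_pvALine]
  rfl
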